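-- pv_equiv track=rewrite | github.com/mabredin/playing_with_python | Hexlet_Trials/Scrabble/Scrabble.py | scrabble
-- ===== SOURCE A (Python) =====
-- from collections import Counter
--
-- def scrabble(string, word):
--     dict_c = dict(Counter(string.casefold()).most_common())
--     dict_d = dict(Counter(word.casefold()).most_common())
--     if dict_c.keys() & dict_d.keys() == dict_d.keys():
--         for key in dict_d:
--             if dict_d[key] > dict_c[key]:
--                 return False
--         return True
--     return False
-- ===== SOURCE B (Python) =====
-- def scrabble(string, word):
--     # greedy elimination: pull each needed letter out of the pool of available
--     # letters; the word fits iff every removal succeeds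
--     letters = list(string.casefold())
--     for ch in word.casefold():
--         if ch in letters:
--             letters.remove(ch)
--         else:
--             return False
--     return True
-- ===== Notes on version B (the rewrite author's own statement) =====
-- stated objective: simpler
-- what changed: Drops Counter entirely: instead of building two frequency dicts and comparing counts under a keys-intersection guard, B greedily removes each letter of word from a mutable pool of string's letters and answers whether every removal succeeded.
import Mathlib
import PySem

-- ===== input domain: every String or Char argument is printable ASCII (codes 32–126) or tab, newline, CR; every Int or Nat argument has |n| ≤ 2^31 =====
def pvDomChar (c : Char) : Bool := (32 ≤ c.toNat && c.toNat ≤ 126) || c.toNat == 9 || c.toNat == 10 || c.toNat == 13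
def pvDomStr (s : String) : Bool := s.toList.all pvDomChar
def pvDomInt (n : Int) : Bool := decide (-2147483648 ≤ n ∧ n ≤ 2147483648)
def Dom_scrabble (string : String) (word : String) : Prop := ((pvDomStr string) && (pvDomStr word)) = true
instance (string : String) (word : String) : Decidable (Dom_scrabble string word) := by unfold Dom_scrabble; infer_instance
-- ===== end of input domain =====

-- B drops the Counter machinery: it greedily removes each letter of word from a
-- pool of string's letters and answers whether every removal succeeded (objective: simpler).

-- ===== PORT A =====
-- `for key in dict_d: if dict_d[key] > dict_c[key]: return False / return True`
-- (inside the branch every key of dict_d is present in both dicts, so `getD _ 0` is exact)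
def scrabbleLoop (dd dc : PySem.Dict Char Int) : List Char → Bool
  | [] => true
  | k :: ks => if dd.getD k 0 > dc.getD k 0 then false else scrabbleLoop dd dc ks

-- casefold = lower on the ASCII domain; dict(Counter(..).most_common()) is the
-- counter's items sorted by count descending, rebuilt into a dict.
def scrabble (string : String) (word : String) : Bool :=
  let dict_c := PySem.Dict.ofList
    (PySem.List.sorted (PySem.Dict.counter (PySem.Str.lower string).toList).items (fun p => p.2) true)
  let dict_d := PySem.Dict.ofList
    (PySem.List.sorted (PySem.Dict.counter (PySem.Str.lower word).toList).items (fun p => p.2) true)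
  -- dict_c.keys() & dict_d.keys() as a set, compared with dict_d.keys() by set equality
  let inter := dict_c.keys.filter (fun k => dict_d.keys.contains k)
  if inter.all (fun k => dict_d.keys.contains k) && dict_d.keys.all (fun k => inter.contains k) then
    scrabbleLoop dict_d dict_c dict_d.keys
  else false

-- ===== PORT B =====
-- the for-loop over word's letters: `if ch in letters: letters.remove(ch) else: return False`
-- (remove? removes the first occurrence, none = not a member — exactly the branch pair)
def scrabbleConsume : List Char → List Char → Option (List Char)
  | ls, [] => some ls
  | ls, ch :: ws =>
    match PySem.List.remove? ls ch with
    | none => none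
    | some ls' => scrabbleConsume ls' ws

def scrabble_alt (string : String) (word : String) : Bool :=
  (scrabbleConsume (PySem.Str.lower string).toList (PySem.Str.lower word).toList).isSome

-- ===== PRECONDITION & SPEC =====
def Spec_scrabble (string : String) (word : String) (out : Bool) : Prop := out = scrabble_alt string word
instance (string : String) (word : String) (out : Bool) : Decidable (Spec_scrabble string word out) := by unfold Spec_scrabble; infer_instance

-- ===== CLAIM (what is proved, stated in full; the proofs are below) =====
def Claim_equal_scrabble : Prop := ∀ (string : String) (word : String), Dom_scrabble string word → Spec_scrabble string word (scrabble string word)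

-- ===== LEMMAS AND PROOFS =====

-- an update by fresh, pairwise-distinct keys just appends the pairs
theorem pv_update_items {κ ν : Type} [BEq κ] [LawfulBEq κ]
    (ps : List (κ × ν)) (d : PySem.Dict κ ν)
    (hfresh : ∀ p ∈ ps, p.1 ∉ d.keys) (hnd : (ps.map Prod.fst).Nodup) :
    (d.update ps).items = d.items ++ ps := by
  induction ps generalizing d with
  | nil => simp [PySem.Dict.update]
  | cons p ps ih =>
    have hp1 : p.1 ∉ d.keys := hfresh p (List.mem_cons_self ..)
    have hc : d.contains p.1 = false := by
      simp only [PySem.Dict.keys, List.mem_map, not_exists] at hp1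
      simp only [PySem.Dict.contains, List.any_eq_false, beq_iff_eq]
      intro q hq h
      exact hp1 q ⟨hq, h⟩
    have hins : (d.insert p.1 p.2).items = d.items ++ [p] := by
      simp [PySem.Dict.insert, hc]
    have hndtl : (ps.map Prod.fst).Nodup := by
      simp only [List.map_cons, List.nodup_cons] at hnd
      exact hnd.2
    have hp1tl : p.1 ∉ ps.map Prod.fst := by
      simp only [List.map_cons, List.nodup_cons] at hnd
      exact hnd.1
    have hfresh' : ∀ q ∈ ps, q.1 ∉ (d.insert p.1 p.2).keys := by
      intro q hq
      have h1 : q.1 ∉ d.keys := hfresh q (List.mem_cons_of_mem _ hq)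
      have h2 : q.1 ≠ p.1 := by
        intro h
        exact hp1tl (h ▸ List.mem_map_of_mem hq)
      have hk : (d.insert p.1 p.2).keys = d.keys ++ [p.1] := by
        simp [PySem.Dict.keys, hins]
      rw [hk]
      simp only [List.mem_append, List.mem_singleton]
      rintro (h | h)
      · exact h1 h
      · exact h2 h
    have hstep : d.update (p :: ps) = (d.insert p.1 p.2).update ps := rfl
    rw [hstep, ih _ hfresh' hndtl, hins]
    simp

theorem pv_items_ofList {κ ν : Type} [BEq κ] [LawfulBEq κ]
    (ps : List (κ × ν)) (hnd : (ps.map Prod.fst).Nodup) :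
    (PySem.Dict.ofList ps).items = ps := by
  have h := pv_update_items ps PySem.Dict.empty (by
    intro p _
    simp [PySem.Dict.empty, PySem.Dict.keys]) hnd
  simpa [PySem.Dict.ofList, PySem.Dict.empty] using h

-- the sorted counter items have pairwise-distinct keys
theorem pv_nodup_sorted_counter (xs : List Char) :
    ((PySem.List.sorted (PySem.Dict.counter xs).items (fun p => p.2) true).map Prod.fst).Nodup := by
  have hperm : (PySem.List.sorted (PySem.Dict.counter xs).items (fun p => p.2) true).Perm
      (PySem.Dict.counter xs).items := PySem.List.sorted_perm _ _ _
  have hnd : ((PySem.Dict.counter xs).items.map Prod.fst).Nodup := by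
    rw [PySem.Dict.items_counter, List.map_map]
    have hid : (Prod.fst ∘ fun k : Char => (k, (List.count k xs : Int))) = id := rfl
    rw [hid, List.map_id]
    exact PySem.Set.nodup_ofList xs
  exact ((hperm.map Prod.fst).nodup_iff).mpr hnd

-- the rebuilt dict of sorted counter items looks up exactly the count
theorem pv_getD_dict (xs : List Char) (k : Char) :
    (PySem.Dict.ofList
      (PySem.List.sorted (PySem.Dict.counter xs).items (fun p => p.2) true)).getD k 0
      = (xs.count k : Int) := by
  have hnd := pv_nodup_sorted_counter xs
  by_cases hx : k ∈ xs
  · have hmem : (k, (List.count k xs : Int)) ∈ (PySem.Dict.counter xs).items := by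
      rw [PySem.Dict.items_counter]
      exact List.mem_map_of_mem ((PySem.Set.mem_ofList xs k).mpr hx)
    have hmem' : (k, (List.count k xs : Int)) ∈
        (PySem.List.sorted (PySem.Dict.counter xs).items (fun p => p.2) true) :=
      (PySem.List.mem_sorted _ _ _ _).mpr hmem
    have hmem'' : (k, (List.count k xs : Int)) ∈
        (PySem.Dict.ofList
          (PySem.List.sorted (PySem.Dict.counter xs).items (fun p => p.2) true)).items := by
      rw [pv_items_ofList _ hnd]
      exact hmem'
    exact PySem.Dict.getD_of_mem_items _ hmem'' (PySem.Dict.nodup_keys_ofList _) 0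
  · have hcontains : (PySem.Dict.ofList
        (PySem.List.sorted (PySem.Dict.counter xs).items (fun p => p.2) true)).contains k = false := by
      simp only [PySem.Dict.contains, List.any_eq_false, beq_iff_eq]
      intro q hq h
      rw [pv_items_ofList _ hnd] at hq
      have hq' : q ∈ (PySem.Dict.counter xs).items := (PySem.List.mem_sorted _ _ _ _).mp hq
      rw [PySem.Dict.items_counter] at hq'
      obtain ⟨c, hc, hce⟩ := List.mem_map.mp hq'
      have : c = k := by rw [← hce] at h; exact h
      exact hx ((PySem.Set.mem_ofList xs k).mp (this ▸ hc))
    rw [PySem.Dict.getD_of_not_contains _ _ hcontains]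
    simp [List.count_eq_zero.mpr hx]

theorem pv_mem_keys_dict (xs : List Char) (k : Char) :
    k ∈ (PySem.Dict.ofList
      (PySem.List.sorted (PySem.Dict.counter xs).items (fun p => p.2) true)).keys ↔ k ∈ xs := by
  have hnd := pv_nodup_sorted_counter xs
  have hk : (PySem.Dict.ofList
      (PySem.List.sorted (PySem.Dict.counter xs).items (fun p => p.2) true)).keys
      = (PySem.List.sorted (PySem.Dict.counter xs).items (fun p => p.2) true).map Prod.fst := by
    simp [PySem.Dict.keys, pv_items_ofList _ hnd]
  rw [hk]
  have hperm : ((PySem.List.sorted (PySem.Dict.counter xs).items (fun p => p.2) true).map Prod.fst).Perm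
      ((PySem.Dict.counter xs).items.map Prod.fst) :=
    (PySem.List.sorted_perm _ _ _).map Prod.fst
  rw [hperm.mem_iff, PySem.Dict.items_counter]
  simp only [List.map_map]
  constructor
  · intro h
    obtain ⟨c, hc, hce⟩ := List.mem_map.mp h
    exact (PySem.Set.mem_ofList xs k).mp (by simpa [← hce] using hc)
  · intro h
    exact List.mem_map.mpr ⟨k, (PySem.Set.mem_ofList xs k).mpr h, rfl⟩

theorem pv_loop_iff (dd dc : PySem.Dict Char Int) (ks : List Char) :
    scrabbleLoop dd dc ks = true ↔ ∀ k ∈ ks, dd.getD k 0 ≤ dc.getD k 0 := by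
  induction ks with
  | nil => simp [scrabbleLoop]
  | cons k ks ih =>
    simp only [scrabbleLoop]
    split_ifs with h
    · simp only [false_iff, not_forall]
      exact ⟨k, List.mem_cons_self .., by omega⟩
    · rw [ih]
      constructor
      · intro hall q hq
        rcases List.mem_cons.mp hq with rfl | hq
        · omega
        · exact hall q hq
      · intro hall q hq
        exact hall q (List.mem_cons_of_mem _ hq)

theorem pv_scrabble_iff (string word : String) :
    scrabble string word = true ↔
      ∀ k ∈ (PySem.Str.lower word).toList,
        ((PySem.Str.lower word).toList.count k ≤ (PySem.Str.lower string).toList.count k) := by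
  simp only [scrabble]
  set ls := (PySem.Str.lower string).toList with hls
  set lw := (PySem.Str.lower word).toList with hlw
  set dc := PySem.Dict.ofList
    (PySem.List.sorted (PySem.Dict.counter ls).items (fun p => p.2) true) with hdc
  set dd := PySem.Dict.ofList
    (PySem.List.sorted (PySem.Dict.counter lw).items (fun p => p.2) true) with hdd
  have hgc : ∀ k, dc.getD k 0 = (ls.count k : Int) := fun k => pv_getD_dict ls k
  have hgd : ∀ k, dd.getD k 0 = (lw.count k : Int) := fun k => pv_getD_dict lw k
  have hkc : ∀ k, k ∈ dc.keys ↔ k ∈ ls := fun k => pv_mem_keys_dict ls k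
  have hkd : ∀ k, k ∈ dd.keys ↔ k ∈ lw := fun k => pv_mem_keys_dict lw k
  have hc1 : (dc.keys.filter (fun k => dd.keys.contains k)).all (fun k => dd.keys.contains k) = true := by
    simp only [List.all_eq_true]
    intro k hk
    exact (List.mem_filter.mp hk).2
  by_cases hsub : ∀ k ∈ lw, k ∈ ls
  · have hc2 : dd.keys.all (fun k => (dc.keys.filter (fun k => dd.keys.contains k)).contains k) = true := by
      simp only [List.all_eq_true]
      intro k hk
      have hklw : k ∈ lw := (hkd k).mp hk
      have hkls : k ∈ ls := hsub k hklw
      have : k ∈ dc.keys.filter (fun k => dd.keys.contains k) :=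
        List.mem_filter.mpr ⟨(hkc k).mpr hkls, by simpa using hk⟩
      simpa using this
    rw [hc1, hc2]
    simp only [Bool.and_self, if_true]
    rw [pv_loop_iff]
    constructor
    · intro hall k hk
      have := hall k ((hkd k).mpr hk)
      rw [hgd, hgc] at this
      exact_mod_cast this
    · intro hall k hk
      rw [hgd, hgc]
      exact_mod_cast hall k ((hkd k).mp hk)
  · rw [not_forall] at hsub
    obtain ⟨k, hk⟩ := hsub
    rw [Classical.not_imp] at hk
    obtain ⟨hklw, hknls⟩ := hk
    have hc2 : dd.keys.all (fun k => (dc.keys.filter (fun k => dd.keys.contains k)).contains k) = false := by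
      apply List.all_eq_false.mpr
      refine ⟨k, (hkd k).mpr hklw, ?_⟩
      simp only [List.contains_eq_mem, List.mem_filter, decide_eq_true_eq, not_and]
      intro hkc'
      exact absurd ((hkc k).mp hkc') hknls
    rw [hc1, hc2]
    simp only [Bool.and_false, Bool.false_eq_true, if_false, false_iff, not_forall]
    refine ⟨k, hklw, ?_⟩
    have h1 : 0 < lw.count k := List.count_pos_iff.mpr hklw
    have h2 : ls.count k = 0 := List.count_eq_zero.mpr hknls
    omega

-- the greedy removal loop succeeds iff the pool covers every needed count
theorem pv_consume_iff (ws ls : List Char) :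
    (scrabbleConsume ls ws).isSome = true ↔ ∀ c ∈ ws, ws.count c ≤ ls.count c := by
  induction ws generalizing ls with
  | nil => simp [scrabbleConsume]
  | cons ch ws ih =>
    by_cases hmem : ch ∈ ls
    · rw [show scrabbleConsume ls (ch :: ws) = scrabbleConsume (ls.erase ch) ws by
        simp [scrabbleConsume, PySem.List.remove?_eq_some_erase ls ch hmem]]
      rw [ih]
      have hpos : 0 < List.count ch ls := List.count_pos_iff.mpr hmem
      have herase : ∀ d : Char, List.count d (ls.erase ch)
          = if d = ch then List.count d ls - 1 else List.count d ls := by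
        intro d
        by_cases h : d = ch
        · subst h; rw [if_pos rfl]; exact List.count_erase_self
        · rw [if_neg h]; exact List.count_erase_of_ne h
      have hcons : ∀ d : Char, List.count d (ch :: ws)
          = if d = ch then List.count d ws + 1 else List.count d ws := by
        intro d
        by_cases h : d = ch
        · subst h; rw [if_pos rfl]; exact List.count_cons_self
        · rw [if_neg h]; exact List.count_cons_of_ne (fun he => h he.symm)
      constructor
      · intro hall c hc
        rw [hcons c]
        by_cases h : c = ch
        · subst h
          rw [if_pos rfl]
          by_cases hcw : c ∈ ws
          · have := hall c hcw
            rw [herase c, if_pos rfl] at this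
            omega
          · rw [List.count_eq_zero.mpr hcw]
            omega
        · rw [if_neg h]
          have hc2 : c ∈ ws := by
            rcases List.mem_cons.mp hc with h2 | h2
            · exact absurd h2 h
            · exact h2
          have := hall c hc2
          rw [herase c, if_neg h] at this
          omega
      · intro hall c hc
        rw [herase c]
        by_cases h : c = ch
        · subst h
          rw [if_pos rfl]
          have := hall c (List.mem_cons_self ..)
          rw [hcons c, if_pos rfl] at this
          omega
        · rw [if_neg h]
          have := hall c (List.mem_cons_of_mem _ hc)
          rw [hcons c, if_neg h] at this
          omega
    · rw [show scrabbleConsume ls (ch :: ws) = none from by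
        simp [scrabbleConsume, (PySem.List.remove?_eq_none_iff ls ch).mpr hmem]]
      simp only [Option.isSome_none, Bool.false_eq_true, false_iff, not_forall]
      refine ⟨ch, List.mem_cons_self .., ?_⟩
      have h2 : List.count ch ls = 0 := List.count_eq_zero.mpr hmem
      simp only [List.count_cons_self]
      omega

theorem pv_alt_iff (string word : String) :
    scrabble_alt string word = true ↔
      ∀ k ∈ (PySem.Str.lower word).toList,
        ((PySem.Str.lower word).toList.count k ≤ (PySem.Str.lower string).toList.count k) := by
  simp only [scrabble_alt]
  exact pv_consume_iff _ _

-- ===== VERDICT (by name: the statement is the Claim_ definition above) =====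
theorem scrabble_spec : Claim_equal_scrabble := by
  intro string word _
  unfold Spec_scrabble
  rw [Bool.eq_iff_iff, pv_scrabble_iff, pv_alt_iff]
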